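-- pv_equiv track=rewrite | github.com/kkyu-min/Programmers | level_0/공 던지기.py | solution
-- ===== SOURCE A (Python) =====
-- def solution(numbers, k):
--     answer = 0
--     index = 0
--     for i in range(k-1):
--         index += 2
--         if index - len(numbers) == 0:
--             index = 0
--         elif index - len(numbers) == 1:
--             index = 1
--     answer = numbers[index]
--     return answer
-- ===== SOURCE B (Python) =====
-- def solution(numbers, k):
--     steps = max(k - 1, 0)
--     return numbers[(2 * steps) % len(numbers)]
-- ===== Notes on version B (the rewrite author's own statement) =====
-- stated objective: faster
-- what changed: Replaced the k-1-step simulation loop (advance by 2, wrap at len and len+1) by the closed form numbers[2*(k-1) % len(numbers)] (with negative k-1 clamped to 0).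
import Mathlib
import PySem

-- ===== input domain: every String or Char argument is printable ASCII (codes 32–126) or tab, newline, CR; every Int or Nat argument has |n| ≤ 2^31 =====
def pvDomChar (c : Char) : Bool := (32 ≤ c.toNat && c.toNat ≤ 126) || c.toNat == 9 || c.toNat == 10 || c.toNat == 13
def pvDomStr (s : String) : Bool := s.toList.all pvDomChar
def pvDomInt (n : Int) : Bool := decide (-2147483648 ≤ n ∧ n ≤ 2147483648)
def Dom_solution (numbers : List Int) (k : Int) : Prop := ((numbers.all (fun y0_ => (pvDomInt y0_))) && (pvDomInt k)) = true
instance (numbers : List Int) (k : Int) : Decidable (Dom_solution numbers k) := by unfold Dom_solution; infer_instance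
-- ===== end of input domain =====

-- B replaces A's k-1-step simulation loop by the closed form numbers[2*(k-1) % len] (O(1) vs O(k)).

-- ===== PORT A =====
def solution (numbers : List Int) (k : Int) : Int :=
  let index : Int :=
    (PySem.List.pyRange 0 (k - 1) 1).foldl
      (fun index _ =>
        let index := index + 2
        if index - (numbers.length : Int) = 0 then 0
        else if index - (numbers.length : Int) = 1 then 1
        else index) 0
  (PySem.List.pyGet? numbers index).getD 0

-- ===== PORT B =====
def solution_alt (numbers : List Int) (k : Int) : Int :=
  let steps : Int := max (k - 1) 0
  (PySem.List.pyGet? numbers (PySem.Int.mod (2 * steps) (numbers.length : Int))).getD 0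

-- ===== PRECONDITION & SPEC =====
-- Pre_ excludes exactly the inputs on which A raises IndexError: the empty list, and a
-- single-element list with k ≥ 2 (A's wrap logic leaves the index out of range there).
def Pre_solution (numbers : List Int) (k : Int) : Prop :=
  2 ≤ numbers.length ∨ (numbers.length = 1 ∧ k ≤ 1)
instance (numbers : List Int) (k : Int) : Decidable (Pre_solution numbers k) := by
  unfold Pre_solution; infer_instance
def pvWitness_solution : List Int × Int := ([10, 20, 30, 40, 50], 4)

def Spec_solution (numbers : List Int) (k : Int) (out : Int) : Prop := out = solution_alt numbers k
instance (numbers : List Int) (k : Int) (out : Int) : Decidable (Spec_solution numbers k out) := by unfold Spec_solution; infer_instance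

-- ===== CLAIM (what is proved, stated in full; the proofs are below) =====
def Claim_equal_solution : Prop := ∀ (numbers : List Int) (k : Int), Dom_solution numbers k → Pre_solution numbers k → Spec_solution numbers k (solution numbers k)

-- ===== LEMMAS AND PROOFS =====

-- A's loop body, as a function of the list length n.
def pvStep (n : Int) (index : Int) : Int :=
  if index + 2 - n = 0 then 0 else if index + 2 - n = 1 then 1 else index + 2

theorem pv_foldl_const {α : Type} (g : Int → Int) (l : List α) (init : Int) :
    l.foldl (fun s _ => g s) init = g^[l.length] init := by
  induction l generalizing init with
  | nil => rfl
  | cons x xs ih => simp [List.foldl, ih, Function.iterate_succ_apply]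

theorem pv_iterate_step (n : Int) (hn : 2 ≤ n) (m : Nat) :
    (pvStep n)^[m] 0 = (2 * (m : Int)) % n := by
  induction m with
  | zero => simp
  | succ m ih =>
    rw [Function.iterate_succ_apply', ih]
    have h0 : 0 ≤ (2 * (m : Int)) % n := Int.emod_nonneg _ (by omega)
    have h1 : (2 * (m : Int)) % n < n := Int.emod_lt_of_pos _ (by omega)
    have hadd : ((2 * (m : Int)) % n + 2) % n = (2 * ((m : Nat) + 1 : Int)) % n := by
      rw [Int.emod_add_emod]; ring_nf
    push_cast
    rw [← hadd]
    unfold pvStep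
    set r := (2 * (m : Int)) % n with hr
    split_ifs with hc0 hc1
    · rw [show r + 2 = n by omega, Int.emod_self]
    · rw [show r + 2 = n + 1 by omega, show n + 1 = 1 + n * 1 by ring,
        Int.add_mul_emod_self_left, Int.emod_eq_of_lt (by omega) (by omega)]
    · rw [Int.emod_eq_of_lt (by omega) (by omega)]

-- ===== VERDICT (by name: the statement is the Claim_ definition above) =====
theorem solution_spec : Claim_equal_solution := by
  intro numbers k _ hpre
  unfold Spec_solution solution solution_alt
  have hn1 : 1 ≤ numbers.length := by
    rcases hpre with h | ⟨h, _⟩ <;> omega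
  by_cases hk : k ≤ 1
  · rw [PySem.List.pyRange_one_eq_nil (by omega)]
    simp only [List.foldl_nil]
    have : max (k - 1) 0 = 0 := by omega
    rw [this]
    norm_num [PySem.Int.mod_eq_emod_of_pos (show (0:Int) < (numbers.length : Int) by exact_mod_cast hn1)]
  · have hn : 2 ≤ numbers.length := by
      rcases hpre with h | ⟨h, hk1⟩
      · exact h
      · omega
    have hnI : (2 : Int) ≤ (numbers.length : Int) := by exact_mod_cast hn
    have hfold :
        (PySem.List.pyRange 0 (k - 1) 1).foldl
          (fun index _ =>
            let index := index + 2
            if index - (numbers.length : Int) = 0 then 0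
            else if index - (numbers.length : Int) = 1 then 1
            else index) 0
        = (pvStep (numbers.length : Int))^[(PySem.List.pyRange 0 (k - 1) 1).length] 0 :=
      pv_foldl_const (pvStep (numbers.length : Int)) _ 0
    rw [hfold, pv_iterate_step _ hnI, PySem.List.length_pyRange_one]
    have hmax : max (k - 1) 0 = k - 1 := by omega
    have hcast : ((k - 1 - 0).toNat : Int) = k - 1 := by omega
    rw [hmax, hcast]
    simp only [PySem.Int.mod_eq_emod_of_pos
      (show (0:Int) < (numbers.length : Int) by omega)]
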